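-- pv_equiv track=rewrite | github.com/giansmart/master-ai | semester I/Programming-101/grupal.py | frecuencia_palabras
-- ===== SOURCE A (Python) =====
-- from typing import List , Dict, Any
--
-- def frecuencia_palabras(documentos: List[str]) -> {}:
--     docs_dict = {}
--     for doc in documentos:
--         # asumiendo que el criterio para hacer el split es el espacio en blanco
--         for palabra in doc.split(" "):
--             if palabra not in docs_dict:
--                 docs_dict[palabra] = 0
--             docs_dict[palabra] += 1
--     return docs_dict
-- ===== SOURCE B (Python) =====
-- def frecuencia_palabras(documentos):
--     palabras = [p for doc in documentos for p in doc.split(" ")]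
--     return {p: palabras.count(p) for p in dict.fromkeys(palabras)}
-- ===== Notes on version B (the rewrite author's own statement) =====
-- stated objective: simpler
-- what changed: Replaces the nested mutate-a-dict counting loop by two comprehensions: flatten all words, then map each first-occurrence-deduplicated word to its count in the flat list.
import Mathlib
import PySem

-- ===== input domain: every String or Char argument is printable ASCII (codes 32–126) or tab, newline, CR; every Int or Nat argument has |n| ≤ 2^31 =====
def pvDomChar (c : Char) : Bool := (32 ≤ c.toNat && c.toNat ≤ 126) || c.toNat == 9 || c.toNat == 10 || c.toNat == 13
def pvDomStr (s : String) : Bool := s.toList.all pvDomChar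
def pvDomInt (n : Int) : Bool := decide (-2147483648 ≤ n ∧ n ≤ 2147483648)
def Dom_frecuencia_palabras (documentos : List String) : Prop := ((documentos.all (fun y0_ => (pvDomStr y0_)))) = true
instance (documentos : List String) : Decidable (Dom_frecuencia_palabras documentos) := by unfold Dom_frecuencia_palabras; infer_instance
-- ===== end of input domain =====

-- B replaces A's nested dict-mutating loop by two comprehensions (flatten, then count per deduplicated word); simpler, not faster.

-- ===== PORT A =====
def frecuencia_palabras (documentos : List String) : List (String × Int) :=
  (documentos.foldl (fun docs_dict doc =>
      ((PySem.Str.split? doc " ").getD []).foldl (fun docs_dict palabra =>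
        let docs_dict := if docs_dict.contains palabra then docs_dict
                         else docs_dict.insert palabra 0
        docs_dict.insert palabra (docs_dict.getD palabra 0 + 1)) docs_dict)
    (PySem.Dict.empty : PySem.Dict String Int)).items

-- ===== PORT B =====
def frecuencia_palabras_alt (documentos : List String) : List (String × Int) :=
  let palabras := documentos.flatMap (fun doc => (PySem.Str.split? doc " ").getD [])
  (PySem.List.dedup palabras).map (fun p => (p, (PySem.List.count palabras p : Int)))

-- ===== PRECONDITION & SPEC =====
def Spec_frecuencia_palabras (documentos : List String) (out : List (String × Int)) : Prop := out = frecuencia_palabras_alt documentos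
instance (documentos : List String) (out : List (String × Int)) : Decidable (Spec_frecuencia_palabras documentos out) := by unfold Spec_frecuencia_palabras; infer_instance

-- ===== CLAIM (what is proved, stated in full; the proofs are below) =====
def Claim_equal_frecuencia_palabras : Prop := ∀ (documentos : List String), Dom_frecuencia_palabras documentos → Spec_frecuencia_palabras documentos (frecuencia_palabras documentos)

-- ===== LEMMAS AND PROOFS =====

-- A's loop body ('if absent, set to 0; then += 1') is the standard counting step.
theorem pv_step_eq (d : PySem.Dict String Int) (x : String) :
    (let d' := if d.contains x then d else d.insert x 0
     d'.insert x (d'.getD x 0 + 1)) = d.insert x (d.getD x 0 + 1) := by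
  by_cases h : d.contains x
  · simp [h]
  · simp only [h, if_false, Bool.false_eq_true]
    rw [PySem.Dict.getD_insert_self, PySem.Dict.insert_insert_self,
        PySem.Dict.getD_of_not_contains (h := by simpa using h)]

-- ===== VERDICT (by name: the statement is the Claim_ definition above) =====
theorem frecuencia_palabras_spec : Claim_equal_frecuencia_palabras := by
  intro documentos _
  show frecuencia_palabras documentos = frecuencia_palabras_alt documentos
  unfold frecuencia_palabras frecuencia_palabras_alt
  simp only [pv_step_eq]
  rw [← List.foldl_flatMap, PySem.Dict.foldl_insert_getD_add_one_eq_counter,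
      PySem.Dict.items_counter]
  simp [PySem.List.dedup_eq_ofList, PySem.List.count_eq]
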